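-- pv_equiv track=rewrite | github.com/ssinghjah/PawPrints | LogAnalyzer/common.py | first_indices_greater_than
-- ===== SOURCE A (Python) =====
-- def first_indices_greater_than(elem1, elem2, list):
--     elem1_index = -1
--     elem2_index = -1
--     for index, elem in enumerate(list):
--         if elem1_index == -1 and elem >= elem1:
--             elem1_index = index
--         if elem2_index == -1 and elem >= elem2:
--             elem2_index = index
--
--         if elem2_index != -1 and elem1_index != -1:
--             break
--     return int(elem1_index), int(elem2_index)
-- ===== SOURCE B (Python) =====
-- def first_indices_greater_than(elem1, elem2, list):
--     idx1 = next((i for i, e in enumerate(list) if e >= elem1), -1)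
--     idx2 = next((i for i, e in enumerate(list) if e >= elem2), -1)
--     return int(idx1), int(idx2)
-- ===== Notes on version B (the rewrite author's own statement) =====
-- stated objective: simpler
-- what changed: Replaces A's single fused scan with coupled sentinel state and an early break by two independent first-match scans (one generator expression per threshold).
import Mathlib
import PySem

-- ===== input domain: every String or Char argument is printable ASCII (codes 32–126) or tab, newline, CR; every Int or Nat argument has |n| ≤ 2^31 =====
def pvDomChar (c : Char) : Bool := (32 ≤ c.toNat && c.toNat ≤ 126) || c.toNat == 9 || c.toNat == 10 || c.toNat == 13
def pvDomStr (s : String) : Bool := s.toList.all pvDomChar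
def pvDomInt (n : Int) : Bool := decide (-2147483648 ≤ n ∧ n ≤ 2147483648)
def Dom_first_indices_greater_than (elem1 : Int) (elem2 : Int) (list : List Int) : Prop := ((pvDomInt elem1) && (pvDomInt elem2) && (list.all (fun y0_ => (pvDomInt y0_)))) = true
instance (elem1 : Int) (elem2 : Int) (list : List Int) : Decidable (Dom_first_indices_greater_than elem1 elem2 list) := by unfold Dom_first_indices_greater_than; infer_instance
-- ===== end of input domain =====

-- B replaces A's single fused scan (coupled sentinel state, early break) by two independent
-- first-match scans, one per threshold; objective: simpler.

-- ===== PORT A =====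
-- the fused loop of A: index counter, both sentinel states, early break when both found
def pvALoop (elem1 elem2 : Int) : List Int → Int → Int → Int → Int × Int
  | [], _, i1, i2 => (i1, i2)
  | e :: rest, idx, i1, i2 =>
    let i1' := if i1 = -1 ∧ e ≥ elem1 then idx else i1
    let i2' := if i2 = -1 ∧ e ≥ elem2 then idx else i2
    if i2' ≠ -1 ∧ i1' ≠ -1 then (i1', i2')
    else pvALoop elem1 elem2 rest (idx + 1) i1' i2'

def first_indices_greater_than (elem1 : Int) (elem2 : Int) (list : List Int) : Int × Int :=
  pvALoop elem1 elem2 list 0 (-1) (-1)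

-- ===== PORT B =====
-- first index (from idx) of an element ≥ t, -1 if none (the `next(…, -1)` scan)
def pvFindFrom (t : Int) : List Int → Int → Int
  | [], _ => -1
  | e :: rest, idx => if e ≥ t then idx else pvFindFrom t rest (idx + 1)

def first_indices_greater_than_alt (elem1 : Int) (elem2 : Int) (list : List Int) : Int × Int :=
  (pvFindFrom elem1 list 0, pvFindFrom elem2 list 0)

-- ===== PRECONDITION & SPEC =====
def Spec_first_indices_greater_than (elem1 : Int) (elem2 : Int) (list : List Int) (out : Int × Int) : Prop := out = first_indices_greater_than_alt elem1 elem2 list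
instance (elem1 : Int) (elem2 : Int) (list : List Int) (out : Int × Int) : Decidable (Spec_first_indices_greater_than elem1 elem2 list out) := by unfold Spec_first_indices_greater_than; infer_instance

-- ===== CLAIM (what is proved, stated in full; the proofs are below) =====
def Claim_equal_first_indices_greater_than : Prop := ∀ (elem1 : Int) (elem2 : Int) (list : List Int), Dom_first_indices_greater_than elem1 elem2 list → Spec_first_indices_greater_than elem1 elem2 list (first_indices_greater_than elem1 elem2 list)

-- ===== LEMMAS AND PROOFS =====

-- the fused loop computes, per component, the independent first-match scan (starting state
-- preserved when ≠ -1); induction on the list, arbitrary nonnegative start index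
lemma pvALoop_eq (elem1 elem2 : Int) (l : List Int) :
    ∀ idx i1 i2 : Int, 0 ≤ idx →
      pvALoop elem1 elem2 l idx i1 i2 =
        ((if i1 = -1 then pvFindFrom elem1 l idx else i1),
         (if i2 = -1 then pvFindFrom elem2 l idx else i2)) := by
  induction l with
  | nil =>
    intro idx i1 i2 _
    simp only [pvALoop, pvFindFrom, Prod.mk.injEq]
    constructor <;> split_ifs <;> omega
  | cons e rest ih =>
    intro idx i1 i2 h
    simp only [pvALoop, pvFindFrom]
    by_cases hb : ((if i2 = -1 ∧ e ≥ elem2 then idx else i2) ≠ -1 ∧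
                   (if i1 = -1 ∧ e ≥ elem1 then idx else i1) ≠ -1)
    · rw [if_pos hb, Prod.mk.injEq]
      constructor <;> split_ifs at * <;> omega
    · rw [if_neg hb]
      rw [ih (idx + 1) _ _ (by omega), Prod.mk.injEq]
      constructor <;> split_ifs <;> first | rfl | omega | (exfalso; exact hb (by constructor <;> omega))

-- ===== VERDICT (by name: the statement is the Claim_ definition above) =====
theorem first_indices_greater_than_spec : Claim_equal_first_indices_greater_than := by
  intro elem1 elem2 list _
  unfold Spec_first_indices_greater_than first_indices_greater_than first_indices_greater_than_alt
  rw [pvALoop_eq elem1 elem2 list 0 (-1) (-1) (by omega)]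
  simp
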